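-- pv_equiv track=rewrite | github.com/JohannaHillebrand/global-connected-tide-gauge-station-clustering | src/inner/timeseries_difference.py | check_overlap_and_remove_missing_data
-- ===== SOURCE A (Python) =====
-- def check_overlap_and_remove_missing_data(time_series_a, time_series_b, total_a_values, total_b_values):
--     for date in time_series_a.keys():
--         if time_series_a[date] != -99999:
--             total_a_values += 1
--     for date in time_series_b.keys():
--         if time_series_b[date] != -99999:
--             total_b_values += 1
--     # remove gaps in the data from both timelines
--     gap_counter = 0
--     remove_from_a = []
--     remove_from_b = []
--     # check for dates that are in timeseries a, but not in timeseries b and vice versa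
--     for date in time_series_a.keys():
--         if date not in time_series_b.keys():
--             remove_from_a.append(date)
--             gap_counter += 1
--     for date in time_series_b.keys():
--         if date not in time_series_a.keys():
--             remove_from_b.append(date)
--             gap_counter += 1
--     # remove invalid values
--     for date in remove_from_a:
--         time_series_a.pop(date)
--     for date in remove_from_b:
--         time_series_b.pop(date)
--     # now check for dates that do not have valid values in either of the timelines
--     remove_from_a = []
--     remove_from_b = []
--     for date in time_series_a:
--         if time_series_a[date] == -99999 or time_series_b[date] == -99999:
--             remove_from_a.append(date)
--             remove_from_b.append(date)
--             gap_counter += 1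
--     # remove invalid values
--     for date in remove_from_a:
--         time_series_a.pop(date)
--     for date in remove_from_b:
--         time_series_b.pop(date)
--     return gap_counter, total_a_values, total_b_values
-- ===== SOURCE B (Python) =====
-- def check_overlap_and_remove_missing_data(time_series_a, time_series_b, total_a_values, total_b_values):
--     total_a_values += sum(1 for v in time_series_a.values() if v != -99999)
--     total_b_values += sum(1 for v in time_series_b.values() if v != -99999)
--     common = time_series_a.keys() & time_series_b.keys()
--     gap_counter = len(time_series_a) + len(time_series_b) - 2 * len(common)
--     keep = {d for d in common
--             if time_series_a[d] != -99999 and time_series_b[d] != -99999}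
--     gap_counter += len(common) - len(keep)
--     for d in list(time_series_a):
--         if d not in keep:
--             del time_series_a[d]
--     for d in list(time_series_b):
--         if d not in keep:
--             del time_series_b[d]
--     return gap_counter, total_a_values, total_b_values
-- ===== Notes on version B (the rewrite author's own statement) =====
-- stated objective: simpler
-- what changed: Replaces A's four staged remove-list loops with one set intersection of the key views plus length arithmetic (gap = |a|+|b|-2|common| + |common|-|keep|), keeping only the 'keep' set in both dicts in place; totals are computed by summing over .values().
import Mathlib
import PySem

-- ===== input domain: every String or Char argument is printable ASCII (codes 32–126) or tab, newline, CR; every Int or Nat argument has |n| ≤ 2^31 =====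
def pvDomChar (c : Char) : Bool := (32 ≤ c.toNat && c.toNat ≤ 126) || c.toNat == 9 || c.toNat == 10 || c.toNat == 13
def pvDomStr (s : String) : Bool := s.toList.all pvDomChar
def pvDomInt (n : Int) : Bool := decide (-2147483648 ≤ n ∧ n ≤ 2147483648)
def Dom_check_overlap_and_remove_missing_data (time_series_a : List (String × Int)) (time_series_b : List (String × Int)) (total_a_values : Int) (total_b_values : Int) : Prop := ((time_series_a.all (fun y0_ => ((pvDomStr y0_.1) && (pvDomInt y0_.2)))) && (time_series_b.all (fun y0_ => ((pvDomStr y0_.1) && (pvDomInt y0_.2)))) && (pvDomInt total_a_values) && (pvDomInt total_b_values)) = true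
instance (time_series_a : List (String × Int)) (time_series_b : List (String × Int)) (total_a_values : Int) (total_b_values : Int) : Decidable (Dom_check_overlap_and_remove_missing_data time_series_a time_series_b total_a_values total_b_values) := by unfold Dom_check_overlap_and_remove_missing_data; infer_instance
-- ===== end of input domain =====

-- B replaces A's four staged remove-list loops by a set intersection of the key views plus
-- length arithmetic; equivalence is about the RETURN value only (the Python functions also
-- mutate their dict arguments, and A and B leave them in the same final state).
-- ===== PORT A =====
def check_overlap_and_remove_missing_data (time_series_a : List (String × Int)) (time_series_b : List (String × Int)) (total_a_values : Int) (total_b_values : Int) : Int × Int × Int :=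
  let da := PySem.Dict.mk time_series_a
  let db := PySem.Dict.mk time_series_b
  let total_a_values := da.keys.foldl (fun acc date => if !(da.getD date 0 == -99999) then acc + 1 else acc) total_a_values
  let total_b_values := db.keys.foldl (fun acc date => if !(db.getD date 0 == -99999) then acc + 1 else acc) total_b_values
  let st1 := da.keys.foldl (fun (st : List String × Int) date =>
      if !(db.contains date) then (st.1 ++ [date], st.2 + 1) else st) ([], (0 : Int))
  let st2 := db.keys.foldl (fun (st : List String × Int) date =>
      if !(da.contains date) then (st.1 ++ [date], st.2 + 1) else st) ([], st1.2)
  let da2 := st1.1.foldl (fun d k => d.erase k) da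
  let db2 := st2.1.foldl (fun d k => d.erase k) db
  let gap := da2.keys.foldl (fun g date =>
      if (da2.getD date 0 == -99999) || (db2.getD date 0 == -99999) then g + 1 else g) st2.2
  (gap, total_a_values, total_b_values)

-- ===== PORT B =====
def check_overlap_and_remove_missing_data_alt (time_series_a : List (String × Int)) (time_series_b : List (String × Int)) (total_a_values : Int) (total_b_values : Int) : Int × Int × Int :=
  let da := PySem.Dict.mk time_series_a
  let db := PySem.Dict.mk time_series_b
  let total_a_values := total_a_values + ((da.values.filter (fun v => !(v == -99999))).length : Int)
  let total_b_values := total_b_values + ((db.values.filter (fun v => !(v == -99999))).length : Int)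
  let common := PySem.Set.inter (PySem.Set.ofList da.keys) db.keys
  let gap : Int := (da.size : Int) + (db.size : Int) - 2 * (common.length : Int)
  let keep := common.filter (fun d => !(da.getD d 0 == -99999) && !(db.getD d 0 == -99999))
  let gap := gap + ((common.length : Int) - (keep.length : Int))
  (gap, total_a_values, total_b_values)

-- ===== PRECONDITION & SPEC =====
-- The two List (String × Int) arguments encode Python dicts, which cannot carry duplicate
-- keys: Pre_ states that representation invariant (key lists without duplicates); it
-- excludes no input the Python function can actually receive.
def Pre_check_overlap_and_remove_missing_data (time_series_a : List (String × Int)) (time_series_b : List (String × Int)) (total_a_values : Int) (total_b_values : Int) : Prop :=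
  (time_series_a.map (fun x => x.1)).Nodup ∧ (time_series_b.map (fun x => x.1)).Nodup
instance (time_series_a : List (String × Int)) (time_series_b : List (String × Int)) (total_a_values : Int) (total_b_values : Int) : Decidable (Pre_check_overlap_and_remove_missing_data time_series_a time_series_b total_a_values total_b_values) := by unfold Pre_check_overlap_and_remove_missing_data; infer_instance

def pvWitness_check_overlap_and_remove_missing_data : (List (String × Int)) × (List (String × Int)) × Int × Int :=
  ([("2000", 12), ("2001", -99999)], [("2001", 7), ("2002", -99999)], 3, 4)

def Spec_check_overlap_and_remove_missing_data (time_series_a : List (String × Int)) (time_series_b : List (String × Int)) (total_a_values : Int) (total_b_values : Int) (out : Int × Int × Int) : Prop := out = check_overlap_and_remove_missing_data_alt time_series_a time_series_b total_a_values total_b_values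
instance (time_series_a : List (String × Int)) (time_series_b : List (String × Int)) (total_a_values : Int) (total_b_values : Int) (out : Int × Int × Int) : Decidable (Spec_check_overlap_and_remove_missing_data time_series_a time_series_b total_a_values total_b_values out) := by unfold Spec_check_overlap_and_remove_missing_data; infer_instance

-- ===== CLAIM =====
def Claim_equal_check_overlap_and_remove_missing_data : Prop := ∀ (time_series_a : List (String × Int)) (time_series_b : List (String × Int)) (total_a_values : Int) (total_b_values : Int), Dom_check_overlap_and_remove_missing_data time_series_a time_series_b total_a_values total_b_values → Pre_check_overlap_and_remove_missing_data time_series_a time_series_b total_a_values total_b_values → Spec_check_overlap_and_remove_missing_data time_series_a time_series_b total_a_values total_b_values (check_overlap_and_remove_missing_data time_series_a time_series_b total_a_values total_b_values)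

-- ===== LEMMAS AND PROOFS =====
-- pair fold
theorem pvPairFold (p : String → Bool) (l : List String) (acc : List String) (g : Int) :
    l.foldl (fun (st : List String × Int) d => if p d then (st.1 ++ [d], st.2 + 1) else st) (acc, g)
      = (acc ++ l.filter p, g + l.countP p) := by
  induction l generalizing acc g with
  | nil => simp
  | cons d l ih =>
    by_cases h : p d
    · simp only [List.foldl_cons, h, if_pos, ih, List.filter_cons_of_pos, List.countP_cons_of_pos]
      refine Prod.ext ?_ ?_ <;> simp
      ring
    · simp [h, ih]

-- erase fold = filter
theorem pvEraseFold (rm : List String) (l : List (String × Int)) :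
    rm.foldl (fun (d : PySem.Dict String Int) k => d.erase k) (PySem.Dict.mk l)
      = PySem.Dict.mk (l.filter (fun q => decide (q.1 ∉ rm))) := by
  induction rm generalizing l with
  | nil => simp
  | cons k rm ih =>
    show rm.foldl _ ((PySem.Dict.mk l).erase k) = _
    have : (PySem.Dict.mk l).erase k = PySem.Dict.mk (l.filter (fun q => !(q.1 == k))) := rfl
    rw [this, ih, List.filter_filter]
    congr 1
    apply List.filter_congr
    intro q _
    by_cases h1 : q.1 = k <;> simp [h1]

theorem pvGetDCons (a : String) (v : Int) (l : List (String × Int)) (k : String) :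
    (PySem.Dict.mk ((a, v) :: l)).getD k 0 = if a == k then v else (PySem.Dict.mk l).getD k 0 := by
  rw [PySem.Dict.getD_eq_get?_getD, PySem.Dict.get?_mk_cons]
  by_cases h : (a == k) <;> simp [h, ← PySem.Dict.getD_eq_get?_getD]

-- lookup unchanged through a key-filtered dict when the key qualifies
theorem pvGetDFilter (l : List (String × Int)) (p : String → Bool) (k : String) (hk : p k = true) :
    (PySem.Dict.mk (l.filter (fun q => p q.1))).getD k 0 = (PySem.Dict.mk l).getD k 0 := by
  induction l with
  | nil => simp
  | cons q l ih =>
    obtain ⟨a, v⟩ := q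
    by_cases h : p a
    · simp only [List.filter_cons, h, if_pos]
      rw [pvGetDCons, pvGetDCons, ih]
    · have hne : ¬ ((a == k) = true) := by
        intro hq
        exact absurd hk (by rw [← eq_of_beq hq]; simpa using h)
      simp only [List.filter_cons, h, if_neg, Bool.false_eq_true, not_false_iff]
      rw [ih, pvGetDCons, if_neg hne]

-- intersection count symmetry
theorem pvInterComm (l m : List String) (hl : l.Nodup) (hm : m.Nodup) :
    l.countP (fun d => decide (d ∈ m)) = m.countP (fun d => decide (d ∈ l)) := by
  rw [List.countP_eq_length_filter, List.countP_eq_length_filter,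
      ← List.toFinset_card_of_nodup (hl.filter _), ← List.toFinset_card_of_nodup (hm.filter _)]
  congr 1
  ext x; simp [And.comm]

theorem pvContainsKeys (l : List (String × Int)) (x : String) :
    PySem.Set.contains (l.map (fun (p : String × Int) => p.1)) x = (PySem.Dict.mk l).contains x := by
  rw [PySem.Dict.contains_eq_decide_mem_keys, PySem.Dict.keys_mk]
  simp [PySem.Set.contains, List.contains_eq_mem]

theorem pvMain (tsa tsb : List (String × Int)) (ta tb : Int)
    (h : Pre_check_overlap_and_remove_missing_data tsa tsb 0 0) :
    check_overlap_and_remove_missing_data tsa tsb ta tb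
      = check_overlap_and_remove_missing_data_alt tsa tsb ta tb := by
  obtain ⟨ha, hb⟩ := h
  unfold check_overlap_and_remove_missing_data check_overlap_and_remove_missing_data_alt
  simp only [PySem.Dict.keys_mk, pvPairFold, PySem.List.foldl_count_if, List.nil_append,
    pvEraseFold, PySem.Set.ofList_eq_self_of_nodup _ ha, PySem.Set.inter]
  -- the second-pass filters keep exactly the common dates
  have hfa : tsa.filter (fun q => decide (q.1 ∉ (List.map (fun (x : String × Int) => x.1) tsa).filter (fun d => !(PySem.Dict.mk tsb).contains d)))
      = tsa.filter (fun q => (PySem.Dict.mk tsb).contains q.1) := by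
    apply List.filter_congr
    intro q hq
    have hqa : q.1 ∈ (List.map (fun (x : String × Int) => x.1) tsa) := List.mem_map_of_mem hq
    rw [PySem.Dict.contains_eq_decide_mem_keys, PySem.Dict.keys_mk]
    by_cases hm : q.1 ∈ (List.map (fun (x : String × Int) => x.1) tsb) <;>
      simp [List.mem_filter, PySem.Dict.contains_eq_decide_mem_keys, hqa, hm]
  have hfb : tsb.filter (fun q => decide (q.1 ∉ (List.map (fun (x : String × Int) => x.1) tsb).filter (fun d => !(PySem.Dict.mk tsa).contains d)))
      = tsb.filter (fun q => (PySem.Dict.mk tsa).contains q.1) := by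
    apply List.filter_congr
    intro q hq
    have hqb : q.1 ∈ (List.map (fun (x : String × Int) => x.1) tsb) := List.mem_map_of_mem hq
    rw [PySem.Dict.contains_eq_decide_mem_keys, PySem.Dict.keys_mk]
    by_cases hm : q.1 ∈ (List.map (fun (x : String × Int) => x.1) tsa) <;>
      simp [List.mem_filter, PySem.Dict.contains_eq_decide_mem_keys, hqb, hm]
  rw [hfa, hfb]
  -- keys of the pruned dict are the common dates in a's order
  have hkeys : (tsa.filter (fun q => (PySem.Dict.mk tsb).contains q.1)).map (fun (x : String × Int) => x.1) = ((List.map (fun (x : String × Int) => x.1) tsa).filter (fun d => (PySem.Dict.mk tsb).contains d)) := by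
    rw [List.filter_map]; rfl
  -- third pass: lookups in the pruned dicts agree with the original dicts
  have hc3 : ((tsa.filter (fun q => (PySem.Dict.mk tsb).contains q.1)).map (fun (x : String × Int) => x.1)).countP
        (fun x => (PySem.Dict.mk (tsa.filter (fun q => (PySem.Dict.mk tsb).contains q.1))).getD x 0 == -99999 ||
                  (PySem.Dict.mk (tsb.filter (fun q => (PySem.Dict.mk tsa).contains q.1))).getD x 0 == -99999)
      = ((List.map (fun (x : String × Int) => x.1) tsa).filter (fun d => (PySem.Dict.mk tsb).contains d)).countP (fun x => !(!((PySem.Dict.mk tsa).getD x 0 == -99999) && !((PySem.Dict.mk tsb).getD x 0 == -99999))) := by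
    rw [hkeys]
    apply List.countP_congr
    intro x hx
    have hxb : (PySem.Dict.mk tsb).contains x = true := (List.mem_filter.mp hx).2
    have hxa : (PySem.Dict.mk tsa).contains x = true := by
      rw [PySem.Dict.contains_eq_decide_mem_keys, PySem.Dict.keys_mk]
      simpa using (List.mem_filter.mp hx).1
    rw [pvGetDFilter tsa _ x hxb, pvGetDFilter tsb _ x hxa]
    cases hA : ((PySem.Dict.mk tsa).getD x 0 == -99999) <;> cases hB : ((PySem.Dict.mk tsb).getD x 0 == -99999) <;> simp [*]
  rw [hc3]
  -- B's common set is the same list of common dates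
  have hB1 : (List.map (fun (x : String × Int) => x.1) tsa).filter (fun x => PySem.Set.contains (List.map (fun (x : String × Int) => x.1) tsb) x) = ((List.map (fun (x : String × Int) => x.1) tsa).filter (fun d => (PySem.Dict.mk tsb).contains d)) := by
    apply List.filter_congr
    intro x _
    exact pvContainsKeys tsb x
  rw [hB1]
  -- totals: values-filter counting equals keys-lookup counting
  have hva : (List.filter (fun v => !v == -99999) (PySem.Dict.mk tsa).values).length
      = (List.map (fun (x : String × Int) => x.1) tsa).countP (fun x => !((PySem.Dict.mk tsa).getD x 0 == -99999)) := by
    rw [← List.countP_eq_length_filter,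
        PySem.Dict.values_eq_map_keys _ (by simpa using ha) 0, PySem.Dict.keys_mk, List.countP_map]
    rfl
  have hvb : (List.filter (fun v => !v == -99999) (PySem.Dict.mk tsb).values).length
      = (List.map (fun (x : String × Int) => x.1) tsb).countP (fun x => !((PySem.Dict.mk tsb).getD x 0 == -99999)) := by
    rw [← List.countP_eq_length_filter,
        PySem.Dict.values_eq_map_keys _ (by simpa using hb) 0, PySem.Dict.keys_mk, List.countP_map]
    rfl
  rw [hva, hvb]
  -- counting identities for the gap counter
  have hpa := List.length_eq_countP_add_countP (l := (List.map (fun (x : String × Int) => x.1) tsa)) (fun d => (PySem.Dict.mk tsb).contains d)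
  have hpb := List.length_eq_countP_add_countP (l := (List.map (fun (x : String × Int) => x.1) tsb)) (fun d => (PySem.Dict.mk tsa).contains d)
  have hpc := List.length_eq_countP_add_countP (l := ((List.map (fun (x : String × Int) => x.1) tsa).filter (fun d => (PySem.Dict.mk tsb).contains d))) (fun x => !((PySem.Dict.mk tsa).getD x 0 == -99999) && !((PySem.Dict.mk tsb).getD x 0 == -99999))
  simp only [decide_not, Bool.decide_coe] at hpa hpb hpc
  have hsym : (List.map (fun (x : String × Int) => x.1) tsb).countP (fun d => (PySem.Dict.mk tsa).contains d) = (List.map (fun (x : String × Int) => x.1) tsa).countP (fun d => (PySem.Dict.mk tsb).contains d) := by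
    have h1 : (List.map (fun (x : String × Int) => x.1) tsb).countP (fun d => (PySem.Dict.mk tsa).contains d) = (List.map (fun (x : String × Int) => x.1) tsb).countP (fun d => decide (d ∈ (List.map (fun (x : String × Int) => x.1) tsa))) := by
      apply List.countP_congr
      intro x _
      rw [PySem.Dict.contains_eq_decide_mem_keys, PySem.Dict.keys_mk]
    have h2 : (List.map (fun (x : String × Int) => x.1) tsa).countP (fun d => (PySem.Dict.mk tsb).contains d) = (List.map (fun (x : String × Int) => x.1) tsa).countP (fun d => decide (d ∈ (List.map (fun (x : String × Int) => x.1) tsb))) := by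
      apply List.countP_congr
      intro x _
      rw [PySem.Dict.contains_eq_decide_mem_keys, PySem.Dict.keys_mk]
    rw [h1, h2]
    exact pvInterComm (List.map (fun (x : String × Int) => x.1) tsb) (List.map (fun (x : String × Int) => x.1) tsa) hb ha
  have hlen : ((List.map (fun (x : String × Int) => x.1) tsa).filter (fun d => (PySem.Dict.mk tsb).contains d)).length = (List.map (fun (x : String × Int) => x.1) tsa).countP (fun d => (PySem.Dict.mk tsb).contains d) := by
    rw [← List.countP_eq_length_filter]
  have hsz : (PySem.Dict.mk tsa).size = tsa.length ∧ (PySem.Dict.mk tsb).size = tsb.length := by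
    constructor <;> rfl
  have hla : (List.map (fun (x : String × Int) => x.1) tsa).length = tsa.length := List.length_map ..
  have hlb : (List.map (fun (x : String × Int) => x.1) tsb).length = tsb.length := List.length_map ..
  have hkeepc : (List.filter (fun d => !(PySem.Dict.mk tsa).getD d 0 == -99999 &&
        !(PySem.Dict.mk tsb).getD d 0 == -99999) ((List.map (fun (x : String × Int) => x.1) tsa).filter (fun d => (PySem.Dict.mk tsb).contains d))).length
      = ((List.map (fun (x : String × Int) => x.1) tsa).filter (fun d => (PySem.Dict.mk tsb).contains d)).countP (fun x => !((PySem.Dict.mk tsa).getD x 0 == -99999) && !((PySem.Dict.mk tsb).getD x 0 == -99999)) := by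
    rw [← List.countP_eq_length_filter]
  rw [hsz.1, hsz.2, hkeepc]
  refine Prod.ext ?_ (Prod.ext rfl rfl)
  simp only [hla, hlb] at hpa hpb
  rw [hlen] at hpc
  simp only
  omega
-- ===== VERDICT =====
theorem check_overlap_and_remove_missing_data_spec : Claim_equal_check_overlap_and_remove_missing_data := by
  intro tsa tsb ta tb _ hpre
  exact pvMain tsa tsb ta tb hpre
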